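-- pv_equiv track=rewrite | github.com/fabiuslongo/ad-caspar | parse_en.py | get_lemma
-- ===== SOURCE A (Python) =====
-- def get_lemma(s):
--     s_list = s.split('_')
--     if len(s_list) == 1:
--         result = s_list[0].split(":")[0]
--     else:
--         result = ""
--         for i in range(len(s_list)):
--             if i == 0:
--                 result = s_list[i].split(':')[0]
--             else:
--                 result = result +"_"+s_list[i].split(':')[0]
--     return result
-- ===== SOURCE B (Python) =====
-- def get_lemma(s):
--     # One left-to-right pass with a skip flag instead of split/loop/join:
--     # a ':' starts skipping, '_' stops skipping (and is kept), everything
--     # else is kept unless we are skipping.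
--     out = []
--     skip = False
--     for c in s:
--         if c == '_':
--             skip = False
--             out.append(c)
--         elif c == ':':
--             skip = True
--         elif not skip:
--             out.append(c)
--     return ''.join(out)
-- ===== Notes on version B (the rewrite author's own statement) =====
-- stated objective: alternative
-- what changed: Replaced split-on-'_'/index-loop/string-rebuild with a single character scan carrying a skip flag that drops each ':' and the following run of non-'_' characters.
import Mathlib
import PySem

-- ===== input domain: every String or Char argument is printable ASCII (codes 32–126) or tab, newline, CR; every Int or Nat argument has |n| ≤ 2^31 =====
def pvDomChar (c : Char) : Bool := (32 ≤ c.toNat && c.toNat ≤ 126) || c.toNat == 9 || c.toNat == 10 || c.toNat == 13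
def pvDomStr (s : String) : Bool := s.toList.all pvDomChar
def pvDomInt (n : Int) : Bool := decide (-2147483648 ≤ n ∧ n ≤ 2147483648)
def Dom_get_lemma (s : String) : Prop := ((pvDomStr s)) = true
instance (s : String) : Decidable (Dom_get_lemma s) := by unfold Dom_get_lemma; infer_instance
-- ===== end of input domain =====

-- B replaces A's split-on-'_' / index-loop / string-rebuild with a single scan carrying a skip flag (alternative decomposition, same cost).

-- ===== PORT A =====
-- A-side helper: `part.split(':')[0]`; split(':') never returns an empty list, so index 0 is always in range
def firstA (p : List Char) : List Char :=
  PySem.List.pyGetD (PySem.Chars.splitOn p [':']) 0 []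

def get_lemma (s : String) : String :=
  let s_list := PySem.Chars.splitOn s.toList ['_']
  if s_list.length = 1 then
    String.mk (firstA (PySem.List.pyGetD s_list 0 []))
  else
    String.mk ((PySem.List.pyRange 0 (s_list.length : Int) 1).foldl
      (fun result i =>
        if i = 0 then firstA (PySem.List.pyGetD s_list i [])
        else result ++ ['_'] ++ firstA (PySem.List.pyGetD s_list i [])) [])

-- ===== PORT B =====
-- B-side helper: one step of the scan; state = (output so far, skip flag)
def bstep (acc : List Char × Bool) (c : Char) : List Char × Bool :=
  if c = '_' then (acc.1 ++ [c], false)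
  else if c = ':' then (acc.1, true)
  else if acc.2 then acc
  else (acc.1 ++ [c], acc.2)

def get_lemma_alt (s : String) : String :=
  String.mk (s.toList.foldl bstep ([], false)).1

-- ===== PRECONDITION & SPEC =====
def Spec_get_lemma (s : String) (out : String) : Prop := out = get_lemma_alt s
instance (s : String) (out : String) : Decidable (Spec_get_lemma s out) := by unfold Spec_get_lemma; infer_instance

-- ===== CLAIM (what is proved, stated in full; the proofs are below) =====
def Claim_equal_get_lemma : Prop := ∀ (s : String), Dom_get_lemma s → Spec_get_lemma s (get_lemma s)

-- ===== LEMMAS AND PROOFS =====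

-- common spec: structural split on a single separator character
def splitU (d : Char) : List Char → List (List Char)
  | [] => [[]]
  | c :: r =>
    if c = d then [] :: splitU d r
    else
      match splitU d r with
      | [] => [[c]]
      | p :: t => (c :: p) :: t

def tw (p : List Char) : List Char := p.takeWhile (· ≠ ':')

def joinF (parts : List (List Char)) : List Char :=
  match parts with
  | [] => []
  | p :: t => tw p ++ t.flatMap (fun q => ['_'] ++ tw q)

lemma splitU_ne_nil (d : Char) (l : List Char) : splitU d l ≠ [] := by
  cases l with
  | nil => simp [splitU]
  | cons c r =>
    simp only [splitU]
    split_ifs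
    · simp
    · cases h : splitU d r <;> simp

lemma splitU_cons_ex (d : Char) (l : List Char) : ∃ p t, splitU d l = p :: t := by
  cases h : splitU d l with
  | nil => exact absurd h (splitU_ne_nil d l)
  | cons p t => exact ⟨p, t, rfl⟩

lemma go_spec (d : Char) : ∀ (l : List Char) (fuel : Nat) (cur : List Char) (acc : List (List Char)),
    l.length < fuel →
    PySem.Chars.splitOn.go [d] fuel l cur acc =
      acc.reverse ++ (cur.reverse ++ (splitU d l).headI) :: (splitU d l).tail := by
  intro l
  induction l with
  | nil =>
    intro fuel cur acc h
    obtain ⟨n, rfl⟩ : ∃ n, fuel = n + 1 := ⟨fuel - 1, by omega⟩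
    simp [PySem.Chars.splitOn.go, splitU]
  | cons c r ih =>
    intro fuel cur acc h
    obtain ⟨n, rfl⟩ : ∃ n, fuel = n + 1 := ⟨fuel - 1, by omega⟩
    have hlt : r.length < n := by simpa using h
    by_cases hc : c = d
    · subst hc
      have hpre : List.isPrefixOf [c] (c :: r) = true := by simp [List.isPrefixOf]
      rw [PySem.Chars.splitOn.go.eq_def]
      simp only [hpre, if_true, List.length_cons, List.length_nil, List.drop_succ_cons,
        List.drop_zero]
      rw [ih n [] (cur.reverse :: acc) hlt]
      obtain ⟨p, t, hpt⟩ := splitU_cons_ex c r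
      simp [splitU, hpt]
    · have hpre : List.isPrefixOf [d] (c :: r) = false := by
        simp [List.isPrefixOf]
        exact fun hdc => absurd hdc.symm hc
      rw [PySem.Chars.splitOn.go.eq_def]
      simp only [hpre, Bool.false_eq_true, if_false]
      rw [ih n (c :: cur) acc hlt]
      obtain ⟨p, t, hpt⟩ := splitU_cons_ex d r
      simp [splitU, hc, hpt]

lemma splitOn_eq_splitU (l : List Char) (d : Char) :
    PySem.Chars.splitOn l [d] = splitU d l := by
  have h := go_spec d l (l.length + 1) [] [] (by omega)
  obtain ⟨p, t, hpt⟩ := splitU_cons_ex d l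
  simp only [PySem.Chars.splitOn] at *
  rw [h, hpt]
  simp

lemma headI_splitU_colon (p : List Char) : (splitU ':' p).headI = tw p := by
  induction p with
  | nil => simp [splitU, tw]
  | cons c r ih =>
    by_cases h : c = ':'
    · subst h; simp [splitU, tw]
    · obtain ⟨q, t, hqt⟩ := splitU_cons_ex ':' r
      simp only [splitU, if_neg h, hqt, List.headI] at *
      simp [tw, h] at *
      exact ih

lemma firstA_eq (p : List Char) : firstA p = tw p := by
  unfold firstA
  rw [splitOn_eq_splitU, PySem.List.pyGetD_ofNat']
  obtain ⟨q, t, hqt⟩ := splitU_cons_ex ':' p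
  have := headI_splitU_colon p
  rw [hqt] at this ⊢
  simpa using this.symm ▸ rfl

lemma bscan_spec (cs : List Char) : ∀ (out : List Char) (skip : Bool),
    (cs.foldl bstep (out, skip)).1 =
      out ++ (if skip then (splitU '_' cs).tail.flatMap (fun q => ['_'] ++ tw q)
              else joinF (splitU '_' cs)) := by
  induction cs with
  | nil => intro out skip; cases skip <;> simp [joinF, splitU, tw]
  | cons c r ih =>
    intro out skip
    obtain ⟨p, t, hpt⟩ := splitU_cons_ex '_' r
    by_cases hu : c = '_'
    · subst hu
      cases skip <;>
        simp [bstep, List.foldl_cons, ih, hpt, joinF, splitU, tw]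
    · by_cases hc : c = ':'
      · subst hc
        cases skip <;>
          simp [bstep, List.foldl_cons, ih, hpt, joinF, splitU, tw]
      · cases skip <;>
          simp [bstep, hu, hc, List.foldl_cons, ih, hpt, joinF, splitU, tw]

lemma getA_eq (s : String) : get_lemma s = String.mk (joinF (splitU '_' s.toList)) := by
  unfold get_lemma
  obtain ⟨p, t, hpt⟩ := splitU_cons_ex '_' s.toList
  simp only [splitOn_eq_splitU, hpt]
  by_cases ht : t = []
  · subst ht
    simp [PySem.List.pyGetD_ofNat', firstA_eq, joinF]
  · have hlen : (p :: t).length ≠ 1 := by simpa using ht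
    rw [if_neg hlen]
    have h0 : (0 : Int) < ((p :: t).length : Int) := by simp
    rw [PySem.List.pyRange_one_cons h0, List.foldl_cons]
    simp only [if_true, zero_add, PySem.List.pyGetD_ofNat', List.getD_cons_zero]
    have hcongr := PySem.List.foldl_congr_mem
      (PySem.List.pyRange 1 ((p :: t).length : Int))
      (fun result i =>
        if i = 0 then firstA (PySem.List.pyGetD (p :: t) i [])
        else result ++ ['_'] ++ firstA (PySem.List.pyGetD (p :: t) i []))
      (fun result i => result ++ ['_'] ++ firstA (PySem.List.pyGetD (p :: t) i []))
      (firstA p)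
      (by
        intro acc x hx
        have hx1 : (1 : Int) ≤ x := (PySem.List.mem_pyRange_one.mp hx).1
        have : x ≠ 0 := by omega
        simp [this])
    rw [hcongr]
    have hfold := PySem.List.foldl_pyRange_pyGetD' (p :: t) ([] : List Char)
      (fun acc q => acc ++ ['_'] ++ firstA q) (firstA p) (a := 1) (by norm_num)
    rw [hfold]
    simp only [Int.toNat_one, List.drop_one, List.tail_cons]
    have hflat := PySem.List.foldl_append_eq_flatMap (fun q => ['_'] ++ firstA q) t (firstA p)
    simp only [List.append_assoc] at hflat ⊢
    rw [hflat]
    simp [firstA_eq, joinF]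

-- ===== VERDICT (by name: the statement is the Claim_ definition above) =====
theorem get_lemma_spec : Claim_equal_get_lemma := by
  intro s _
  unfold Spec_get_lemma get_lemma_alt
  rw [getA_eq, bscan_spec s.toList [] false]
  simp
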